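-- pv_equiv track=rewrite | github.com/antoinelouatron/base-apps | src/bulkimport/dict_utils.py | is_injection
-- ===== SOURCE A (Python) =====
-- def is_injection(d, E, F):
--     """
--     Check if dictionary d is an injection from sequences E to F.
--
--     E must be the keys and F the values of d.
--     >>> d = {'a': 1, 'b': 2}
--     >>> is_injection(d, 'ab', (1,1))
--     False
--     >>> is_injection(d, 'ab', (1,3))
--     False
--     >>> is_injection(d, 'ac', (1,3))
--     False
--     >>> is_injection(d, 'ac', (1,2))
--     False
--     >>> is_injection(d, 'ab', (1,2))
--     True
--     >>> is_injection(d, 'ab', (1,2,3))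
--     True
--     """
--     n = len(d)
--     if len(E) != n:
--         return False
--     occurrences = {}
--     for f in F:
--         occurrences[f] = False  # has this element been encountered yet
--     for e in E:
--         if e not in d:
--             return False
--         oc = occurrences.get(d[e], True)  # if d[e] is not an element of F, oc == True
--         if oc:
--             return False
--         occurrences[d[e]] = True
--     return True
-- ===== SOURCE B (Python) =====
-- def is_injection(d, E, F):
--     if len(E) != len(d):
--         return False
--     vals = []
--     for e in E:
--         if e not in d:
--             return False
--         vals.append(d[e])
--     Fset = set(F)
--     return all(v in Fset for v in vals) and len(set(vals)) == len(vals)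
-- ===== Notes on version B (the rewrite author's own statement) =====
-- stated objective: simpler
-- what changed: Replaced the fused stateful scan with an occurrence-flag dict by a gather pass collecting the image of E, followed by two separate set-based checks: image subset of set(F) and injectivity via len(set(vals))==len(vals).
import Mathlib
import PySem

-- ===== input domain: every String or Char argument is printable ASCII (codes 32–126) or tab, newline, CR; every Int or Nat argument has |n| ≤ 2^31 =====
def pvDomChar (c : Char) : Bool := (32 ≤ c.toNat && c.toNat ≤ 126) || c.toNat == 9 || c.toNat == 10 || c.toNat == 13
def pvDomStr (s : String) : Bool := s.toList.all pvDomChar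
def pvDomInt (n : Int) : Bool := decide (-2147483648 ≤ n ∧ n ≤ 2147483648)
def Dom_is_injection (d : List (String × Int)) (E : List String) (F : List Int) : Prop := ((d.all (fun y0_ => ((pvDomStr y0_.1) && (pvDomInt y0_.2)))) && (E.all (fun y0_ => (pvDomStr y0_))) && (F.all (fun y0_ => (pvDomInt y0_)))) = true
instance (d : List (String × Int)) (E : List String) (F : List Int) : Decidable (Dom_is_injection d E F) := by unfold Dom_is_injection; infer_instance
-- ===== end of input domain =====

-- B replaces A's fused occurrence-flag scan by a gather pass plus two set-based checks (simpler decomposition, same cost).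


-- ===== PORT A =====
-- the second loop of A: 'for e in E: if e not in d: return False; oc = occurrences.get(d[e], True); if oc: return False; occurrences[d[e]] = True'
def pvALoop (dd : PySem.Dict String Int) : PySem.Dict Int Bool → List String → Bool
  | _, [] => true
  | occ, e :: rest =>
    match dd.get? e with
    | none => false                               -- 'if e not in d: return False'
    | some v =>
      if occ.getD v true then false               -- oc = occurrences.get(d[e], True)
      else pvALoop dd (occ.insert v true) rest    -- occurrences[d[e]] = True

def is_injection (d : List (String × Int)) (E : List String) (F : List Int) : Bool :=
  let dd := PySem.Dict.ofList d
  if E.length ≠ dd.size then false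
  else
    let occ : PySem.Dict Int Bool := F.foldl (fun occ f => occ.insert f false) PySem.Dict.empty
    pvALoop dd occ E

-- ===== PORT B =====
-- B's gather pass: 'vals = []; for e in E: if e not in d: return False; vals.append(d[e])'
def pvGather (dd : PySem.Dict String Int) : List String → Option (List Int)
  | [] => some []
  | e :: rest =>
    match dd.get? e with
    | none => none
    | some v => (pvGather dd rest).map (v :: ·)

def is_injection_alt (d : List (String × Int)) (E : List String) (F : List Int) : Bool :=
  let dd := PySem.Dict.ofList d
  if E.length ≠ dd.size then false
  else
    match pvGather dd E with
    | none => false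
    | some vals =>
      let Fset : PySem.Set Int := PySem.Set.ofList F
      vals.all (fun v => Fset.contains v) && ((PySem.Set.ofList vals).length == vals.length)

-- ===== PRECONDITION & SPEC =====
def Spec_is_injection (d : List (String × Int)) (E : List String) (F : List Int) (out : Bool) : Prop := out = is_injection_alt d E F
instance (d : List (String × Int)) (E : List String) (F : List Int) (out : Bool) : Decidable (Spec_is_injection d E F out) := by unfold Spec_is_injection; infer_instance

-- ===== CLAIM (what is proved, stated in full; the proofs are below) =====
def Claim_equal_is_injection : Prop := ∀ (d : List (String × Int)) (E : List String) (F : List Int), Dom_is_injection d E F → Spec_is_injection d E F (is_injection d E F)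

-- ===== LEMMAS AND PROOFS =====

-- proof-side reference predicate: check the gathered values one by one against F, recording seen values in s
def pvCheck (F : List Int) : List Int → List Int → Bool
  | _, [] => true
  | s, v :: vs => (decide (v ∈ F) && !decide (v ∈ s)) && pvCheck F (v :: s) vs

theorem pvALoop_eq_check (dd : PySem.Dict String Int) (F : List Int) (E : List String)
    (occ : PySem.Dict Int Bool) (s : List Int)
    (hocc : ∀ v, occ.getD v true = !(decide (v ∈ F) && !decide (v ∈ s))) :
    pvALoop dd occ E = match pvGather dd E with
      | none => false
      | some vals => pvCheck F s vals := by
  induction E generalizing occ s with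
  | nil => simp [pvALoop, pvGather, pvCheck]
  | cons e rest ih =>
    simp only [pvALoop, pvGather]
    cases hget : dd.get? e with
    | none => simp
    | some v =>
      simp only [hocc v]
      by_cases hv : (decide (v ∈ F) && !decide (v ∈ s)) = true
      · simp only [hv, Bool.not_true]
        rw [ih (occ.insert v true) (v :: s) ?_]
        · cases pvGather dd rest with
          | none => simp
          | some vals => simp [pvCheck, hv]
        · intro x
          rw [PySem.Dict.getD_insert]
          by_cases hx : x = v
          · simp [hx]
          · simp [hx, hocc x]
      · simp only [Bool.not_eq_true] at hv
        simp only [hv, Bool.not_false, if_true]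
        cases pvGather dd rest with
        | none => simp
        | some vals => simp [pvCheck, hv]

theorem pvInitOcc_getD (F : List Int) (v : Int) :
    (F.foldl (fun occ f => occ.insert f false) (PySem.Dict.empty : PySem.Dict Int Bool)).getD v true
      = !(decide (v ∈ F) && !decide (v ∈ ([] : List Int))) := by
  simp only [List.not_mem_nil, decide_false, Bool.not_false, Bool.and_true]
  suffices h : ∀ (occ : PySem.Dict Int Bool),
      (F.foldl (fun occ f => occ.insert f false) occ).getD v true
        = if v ∈ F then false else occ.getD v true by
    rw [h PySem.Dict.empty, PySem.Dict.getD_empty]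
    by_cases hv : v ∈ F <;> simp [hv]
  induction F with
  | nil => simp
  | cons f rest ih =>
    intro occ
    simp only [List.foldl_cons, ih, List.mem_cons, PySem.Dict.getD_insert]
    by_cases hm : v ∈ rest
    · simp [hm]
    · by_cases he : v = f <;> simp [hm, he]

theorem pvSet_ofList_sublist (vals : List Int) : (PySem.Set.ofList vals).Sublist vals := by
  induction vals with
  | nil => simp [PySem.Set.ofList_nil]
  | cons v vs ih =>
    rw [PySem.Set.ofList_cons]
    refine List.Sublist.cons₂ v (List.Sublist.trans ?_ ih)
    simp [PySem.Set.discard, List.filter_sublist]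

theorem pvNodup_iff_len (vals : List Int) :
    ((PySem.Set.ofList vals).length == vals.length) = true ↔ vals.Nodup := by
  constructor
  · intro h
    have := (pvSet_ofList_sublist vals).eq_of_length (by simpa using h)
    rw [← this]; exact PySem.Set.nodup_ofList vals
  · intro h
    simp [PySem.Set.ofList_eq_self_of_nodup _ h]

theorem pvCheck_iff (F : List Int) (vals s : List Int) :
    pvCheck F s vals = true ↔ (∀ v ∈ vals, v ∈ F ∧ v ∉ s) ∧ vals.Nodup := by
  induction vals generalizing s with
  | nil => simp [pvCheck]
  | cons v vs ih =>
    simp only [pvCheck, Bool.and_eq_true, ih, List.nodup_cons, List.mem_cons]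
    constructor
    · rintro ⟨⟨h1, h2⟩, hall, hnd⟩
      refine ⟨?_, ?_, hnd⟩
      · rintro x (rfl | hx)
        · exact ⟨by simpa using h1, by simpa using h2⟩
        · have := hall x hx
          exact ⟨this.1, fun hs => this.2 (Or.inr hs)⟩
      · intro hv
        exact (hall v hv).2 (Or.inl rfl)
    · rintro ⟨hall, hnv, hnd⟩
      have hv := hall v (Or.inl rfl)
      refine ⟨⟨by simpa using hv.1, by simpa using hv.2⟩, ?_, hnd⟩
      intro x hx
      have := hall x (Or.inr hx)
      refine ⟨this.1, ?_⟩
      rintro (rfl | hs)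
      · exact hnv hx
      · exact this.2 hs

-- ===== VERDICT (by name: the statement is the Claim_ definition above) =====
theorem is_injection_spec : Claim_equal_is_injection := by
  intro d E F _
  unfold Spec_is_injection is_injection is_injection_alt
  by_cases hlen : E.length ≠ (PySem.Dict.ofList d).size
  · simp [hlen]
  · simp only [hlen, if_false]
    rw [pvALoop_eq_check (PySem.Dict.ofList d) F E _ [] (pvInitOcc_getD F)]
    cases pvGather (PySem.Dict.ofList d) E with
    | none => rfl
    | some vals =>
      simp only
      rw [Bool.eq_iff_iff]
      rw [pvCheck_iff]
      simp only [Bool.and_eq_true, List.all_eq_true, pvNodup_iff_len,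
        PySem.Set.contains_iff, PySem.Set.mem_ofList]
      constructor
      · rintro ⟨h1, h2⟩; exact ⟨fun v hv => (h1 v hv).1, h2⟩
      · rintro ⟨h1, h2⟩; exact ⟨fun v hv => ⟨h1 v hv, List.not_mem_nil⟩, h2⟩
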